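-- pv_equiv track=rewrite | github.com/lounesbbkr/-hash- | xortest.py | xor_bits
-- ===== SOURCE A (Python) =====
-- def xor_bits(char1, char2):
--     # Convertir les caractères en bits
--     bits1 = bin(ord(char1))[2:]
--     bits2 = bin(ord(char2))[2:]
--
--     # Remplir les bits avec des zéros à gauche pour avoir la même longueur
--     max_length = max(len(bits1), len(bits2))
--     bits1 = bits1.zfill(max_length)
--     bits2 = bits2.zfill(max_length)
--
--     # Effectuer le XOR entre les bits
--     xor_result = ''.join(str(int(bit1) ^ int(bit2)) for bit1, bit2 in zip(bits1, bits2))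
--
--     return xor_result
-- ===== SOURCE B (Python) =====
-- def xor_bits(char1, char2):
--     # Single integer XOR, then zero-pad to the wider input's bit width.
--     a = ord(char1)
--     b = ord(char2)
--     width = max(len(bin(a)) - 2, len(bin(b)) - 2)
--     return format(a ^ b, '0' + str(width) + 'b')
-- ===== Notes on version B (the rewrite author's own statement) =====
-- stated objective: simpler
-- what changed: Replaces the build-two-bit-strings / zfill / per-bit zip-and-join loop with one integer XOR formatted as a zero-padded binary string of the max input bit width.
import Mathlib
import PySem

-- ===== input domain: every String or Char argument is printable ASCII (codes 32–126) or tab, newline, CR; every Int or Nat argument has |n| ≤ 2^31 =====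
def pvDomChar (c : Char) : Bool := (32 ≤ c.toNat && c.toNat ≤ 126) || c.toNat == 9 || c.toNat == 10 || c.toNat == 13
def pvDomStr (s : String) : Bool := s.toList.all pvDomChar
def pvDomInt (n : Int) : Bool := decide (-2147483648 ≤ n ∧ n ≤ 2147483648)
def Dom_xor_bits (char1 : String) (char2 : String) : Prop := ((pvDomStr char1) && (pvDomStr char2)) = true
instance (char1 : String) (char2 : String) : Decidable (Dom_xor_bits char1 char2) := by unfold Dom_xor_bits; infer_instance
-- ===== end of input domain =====

-- B replaces A's build-two-bit-strings / zfill / per-bit zip loop by a single integer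
-- XOR rendered as a zero-padded binary string: simpler (return value only; no mutation).

-- ===== PORT A =====
-- Python's bin(n)[2:] for n ≥ 0: most-significant-first binary digits, '0' for 0 (exact).
def pvBinAux : Nat → Nat → List Char → List Char
  | 0, _, acc => acc
  | fuel+1, n, acc =>
    if n = 0 then acc
    else pvBinAux fuel (n / 2) ((if n % 2 = 1 then '1' else '0') :: acc)

def pvBin (n : Nat) : List Char := if n = 0 then ['0'] else pvBinAux (n + 1) n []
-- A's body applied to the two code points; the zipped digits are only '0'/'1',
-- so Python's int(bit1) ^ int(bit2) is exactly the test below.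
def pvACore (x : Nat) (y : Nat) : List Char :=
  let bits1 := pvBin x
  let bits2 := pvBin y
  let maxLength := max bits1.length bits2.length
  let b1 := List.replicate (maxLength - bits1.length) '0' ++ bits1   -- bits1.zfill(maxLength)
  let b2 := List.replicate (maxLength - bits2.length) '0' ++ bits2   -- bits2.zfill(maxLength)
  (List.zip b1 b2).map (fun p =>
    if ((if p.1 = '1' then 1 else 0) ^^^ (if p.2 = '1' then 1 else 0) : Nat) = 1 then '1' else '0')

-- ord(s) raises TypeError unless s has exactly one character; Pre_ excludes that.
def xor_bits (char1 : String) (char2 : String) : String :=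
  match char1.toList, char2.toList with
  | [c1], [c2] => String.ofList (pvACore c1.toNat c2.toNat)
  | _, _ => ""

-- ===== PORT B =====
-- B-side copy of bin(n)[2:] (helpers may not be shared between the two ports).
def pvBinAuxB : Nat → Nat → List Char → List Char
  | 0, _, acc => acc
  | fuel+1, n, acc =>
    if n = 0 then acc
    else pvBinAuxB fuel (n / 2) ((if n % 2 = 1 then '1' else '0') :: acc)

def pvBinB (n : Nat) : List Char := if n = 0 then ['0'] else pvBinAuxB (n + 1) n []

-- format(v, '0<w>b') for v ≥ 0: binary digits of v left-padded with '0' to width w (exact).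
def pvBCore (x : Nat) (y : Nat) : List Char :=
  let width := max (pvBinB x).length (pvBinB y).length   -- max(len(bin(a))-2, len(bin(b))-2)
  let s := pvBinB (x ^^^ y)
  List.replicate (width - s.length) '0' ++ s

def xor_bits_alt (char1 : String) (char2 : String) : String :=
  if char1.toList.length = 1 ∧ char2.toList.length = 1 then
    String.ofList (pvBCore (char1.toList.headD 'a').toNat (char2.toList.headD 'a').toNat)
  else ""

-- ===== PRECONDITION & SPEC =====
-- Pre_ excludes only the inputs where ord() raises TypeError in BOTH A and B:
-- strings whose length is not exactly 1.
def Pre_xor_bits (char1 : String) (char2 : String) : Prop :=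
  char1.toList.length = 1 ∧ char2.toList.length = 1
instance (char1 : String) (char2 : String) : Decidable (Pre_xor_bits char1 char2) := by
  unfold Pre_xor_bits; infer_instance

def pvWitness_xor_bits : String × String := ("A", "b")

def Spec_xor_bits (char1 : String) (char2 : String) (out : String) : Prop := out = xor_bits_alt char1 char2
instance (char1 : String) (char2 : String) (out : String) : Decidable (Spec_xor_bits char1 char2 out) := by unfold Spec_xor_bits; infer_instance

-- ===== CLAIM (what is proved, stated in full; the proofs are below) =====
def Claim_equal_xor_bits : Prop := ∀ (char1 : String) (char2 : String), Dom_xor_bits char1 char2 → Pre_xor_bits char1 char2 → Spec_xor_bits char1 char2 (xor_bits char1 char2)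

-- ===== LEMMAS AND PROOFS =====

def pvBitChar (b : Bool) : Char := if b then '1' else '0'

-- canonical width-m big-endian bit string of z
def pvCanon (m : Nat) (z : Nat) : List Char :=
  ((List.range m).reverse).map (fun i => pvBitChar (z.testBit i))

theorem pvCanon_length (m z : Nat) : (pvCanon m z).length = m := by
  simp [pvCanon]

theorem pvSize_succ (n : Nat) (h : n ≠ 0) : Nat.size n = Nat.size (n / 2) + 1 := by
  have h1 : Nat.size n ≤ Nat.size (n / 2) + 1 := by
    rw [Nat.size_le, pow_succ]
    have := Nat.lt_size_self (n / 2)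
    omega
  have hs : 0 < Nat.size n := Nat.size_pos.mpr (Nat.pos_of_ne_zero h)
  have h2 : Nat.size (n / 2) + 1 ≤ Nat.size n := by
    have hlt := Nat.lt_size_self n
    have : n / 2 < 2 ^ (Nat.size n - 1) := by
      have : 2 ^ (Nat.size n - 1 + 1) = 2 ^ (Nat.size n) := by
        congr 1; omega
      rw [pow_succ] at this
      omega
    have := Nat.size_le.mpr this
    omega
  omega

-- peel the least significant bit (right end)
theorem pvCanon_succ_lsb (k n : Nat) :
    pvCanon (k + 1) n = pvCanon k (n / 2) ++ [pvBitChar (n.testBit 0)] := by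
  simp only [pvCanon, List.range_succ_eq_map, List.reverse_cons, List.map_append,
    List.map_map, List.map_reverse]
  congr 1
  rw [← List.map_reverse, ← List.map_reverse]
  apply List.map_congr_left
  intro i _
  simp [Function.comp, Nat.testBit_add_one]

-- peel the most significant bit (left end)
theorem pvCanon_succ_msb (k n : Nat) :
    pvCanon (k + 1) n = pvBitChar (n.testBit k) :: pvCanon k n := by
  simp [pvCanon, List.range_succ]

theorem pvBinAux_eq (fuel : Nat) : ∀ n acc, n < 2 ^ fuel →
    pvBinAux fuel n acc = pvCanon (Nat.size n) n ++ acc := by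
  induction fuel with
  | zero =>
    intro n acc h
    interval_cases n
    simp [pvBinAux, pvCanon]
  | succ f ih =>
    intro n acc h
    by_cases hn : n = 0
    · subst hn; simp [pvBinAux, pvCanon]
    · rw [pvBinAux, if_neg hn]
      have hdiv : n / 2 < 2 ^ f := by
        rw [pow_succ] at h; omega
      rw [ih _ _ hdiv, pvSize_succ n hn, pvCanon_succ_lsb]
      have hbit : (if n % 2 = 1 then '1' else '0') = pvBitChar (n.testBit 0) := by
        simp [pvBitChar, Nat.testBit_zero]
      rw [hbit, List.append_assoc]
      rfl

theorem pvBin_eq_canon (n : Nat) (h : n ≠ 0) : pvBin n = pvCanon (Nat.size n) n := by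
  rw [pvBin, if_neg h, pvBinAux_eq (n + 1) n []]
  · exact List.append_nil _
  · calc n < 2 ^ n := Nat.lt_two_pow_self
      _ ≤ 2 ^ (n + 1) := Nat.pow_le_pow_right (by omega) (by omega)

theorem pvBin_length (n : Nat) : (pvBin n).length = if n = 0 then 1 else Nat.size n := by
  by_cases h : n = 0
  · simp [h, pvBin]
  · rw [if_neg h, pvBin_eq_canon n h, pvCanon_length]

theorem pvCanon_zero (m : Nat) : pvCanon m 0 = List.replicate m '0' := by
  simp [pvCanon, Nat.zero_testBit, pvBitChar, List.map_const']

theorem pvPad_canon (m z : Nat) (hs : Nat.size z ≤ m) (hm : 1 ≤ m) :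
    List.replicate (m - (pvBin z).length) '0' ++ pvBin z = pvCanon m z := by
  by_cases hz : z = 0
  · subst hz
    obtain ⟨k, rfl⟩ : ∃ k, m = k + 1 := ⟨m - 1, by omega⟩
    rw [pvCanon_zero, List.replicate_succ']
    simp [pvBin]
  · rw [pvBin_eq_canon z hz, pvCanon_length]
    have hz1 : 1 ≤ Nat.size z := Nat.size_pos.mpr (Nat.pos_of_ne_zero hz)
    clear hm
    induction m with
    | zero => omega
    | succ k ih =>
      by_cases hk : Nat.size z = k + 1
      · rw [hk]; simp
      · have hsk : Nat.size z ≤ k := by omega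
        have hfalse : z.testBit k = false := by
          apply Nat.testBit_lt_two_pow
          exact Nat.size_le.mp hsk
        rw [pvCanon_succ_msb, hfalse]
        rw [← ih hsk]
        have : k + 1 - Nat.size z = (k - Nat.size z) + 1 := by omega
        rw [this, List.replicate_succ, List.cons_append]
        rfl

theorem pvBitChar_xor (a b : Bool) :
    (if ((if pvBitChar a = '1' then 1 else 0) ^^^ (if pvBitChar b = '1' then 1 else 0) : Nat) = 1
      then '1' else '0') = pvBitChar (a ^^ b) := by
  cases a <;> cases b <;> rfl

theorem pvZip_canon (m x y : Nat) :
    (List.zip (pvCanon m x) (pvCanon m y)).map (fun p =>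
      if ((if p.1 = '1' then 1 else 0) ^^^ (if p.2 = '1' then 1 else 0) : Nat) = 1 then '1' else '0')
    = pvCanon m (x ^^^ y) := by
  unfold pvCanon
  rw [List.zip_map', List.map_map]
  apply List.map_congr_left
  intro i _
  simp only [Function.comp, Nat.testBit_xor]
  exact pvBitChar_xor (x.testBit i) (y.testBit i)

theorem pvBinAuxB_eq (fuel : Nat) : ∀ n acc, pvBinAuxB fuel n acc = pvBinAux fuel n acc := by
  induction fuel with
  | zero => intro n acc; rfl
  | succ f ih => intro n acc; rw [pvBinAuxB, pvBinAux]; split <;> simp [ih]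

theorem pvBinB_eq (n : Nat) : pvBinB n = pvBin n := by
  rw [pvBinB, pvBin, pvBinAuxB_eq]

theorem pvCore_eq (x y : Nat) : pvACore x y = pvBCore x y := by
  have len_pos : ∀ z : Nat, 1 ≤ (pvBin z).length := by
    intro z
    rw [pvBin_length]
    split
    · omega
    · exact Nat.size_pos.mpr (Nat.pos_of_ne_zero (by assumption))
  have size_le_len : ∀ z : Nat, Nat.size z ≤ (pvBin z).length := by
    intro z
    rw [pvBin_length]
    split
    · simp_all
    · omega
  set m := max (pvBin x).length (pvBin y).length with hm
  have hm1 : 1 ≤ m := le_trans (len_pos x) (le_max_left _ _)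
  have hsx : Nat.size x ≤ m := le_trans (size_le_len x) (le_max_left _ _)
  have hsy : Nat.size y ≤ m := le_trans (size_le_len y) (le_max_right _ _)
  have hsxy : Nat.size (x ^^^ y) ≤ m :=
    Nat.size_le.mpr (Nat.xor_lt_two_pow (Nat.size_le.mp hsx) (Nat.size_le.mp hsy))
  show (List.zip (List.replicate ((max (pvBin x).length (pvBin y).length) - (pvBin x).length) '0' ++ pvBin x)
        (List.replicate ((max (pvBin x).length (pvBin y).length) - (pvBin y).length) '0' ++ pvBin y)).map _
      = List.replicate ((max (pvBinB x).length (pvBinB y).length) - (pvBinB (x ^^^ y)).length) '0' ++ pvBinB (x ^^^ y)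
  simp only [pvBinB_eq]
  show _ = List.replicate (m - (pvBin (x ^^^ y)).length) '0' ++ pvBin (x ^^^ y)
  rw [pvPad_canon m x hsx hm1, pvPad_canon m y hsy hm1, pvPad_canon m (x ^^^ y) hsxy hm1]
  exact pvZip_canon m x y

theorem pvPorts_eq (c1 c2 : String) : xor_bits c1 c2 = xor_bits_alt c1 c2 := by
  unfold xor_bits xor_bits_alt
  cases h1 : c1.toList with
  | nil => simp
  | cons a t =>
    cases t with
    | nil =>
      cases h2 : c2.toList with
      | nil => simp
      | cons b t2 =>
        cases t2 with
        | nil => simp [pvCore_eq]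
        | cons _ _ => simp
    | cons _ _ => simp

-- ===== VERDICT (by name: the statement is the Claim_ definition above) =====
theorem xor_bits_spec : Claim_equal_xor_bits := by
  intro char1 char2 _ _
  exact pvPorts_eq char1 char2
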